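-- pv_equiv track=rewrite | github.com/rcari013/cse210-01-week3jumpergame-romelitocarino | game/puzzle.py | _initial_printing_of_blanks_for_guessing_on_chosen_word
-- ===== SOURCE A (Python) =====
-- def _initial_printing_of_blanks_for_guessing_on_chosen_word(text):
--     blank_text = ""
--     for extracted_character in text:
--         if extracted_character == " ":
--             blank_text = blank_text + " "
--         else:
--             blank_text = blank_text + "_" + " "
--     return blank_text
-- ===== SOURCE B (Python) =====
-- def _initial_printing_of_blanks_for_guessing_on_chosen_word(text):
--     return " ".join("_ " * len(word) for word in text.split(" "))
-- ===== Notes on version B (the rewrite author's own statement) =====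
-- stated objective: faster
-- what changed: Replaces the per-character accumulation loop (quadratic repeated string concatenation) with a staged split-then-join pipeline: split the text on spaces, render each word as an underscore-space mask by string multiplication, and rejoin the pieces with a single space.
import Mathlib
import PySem

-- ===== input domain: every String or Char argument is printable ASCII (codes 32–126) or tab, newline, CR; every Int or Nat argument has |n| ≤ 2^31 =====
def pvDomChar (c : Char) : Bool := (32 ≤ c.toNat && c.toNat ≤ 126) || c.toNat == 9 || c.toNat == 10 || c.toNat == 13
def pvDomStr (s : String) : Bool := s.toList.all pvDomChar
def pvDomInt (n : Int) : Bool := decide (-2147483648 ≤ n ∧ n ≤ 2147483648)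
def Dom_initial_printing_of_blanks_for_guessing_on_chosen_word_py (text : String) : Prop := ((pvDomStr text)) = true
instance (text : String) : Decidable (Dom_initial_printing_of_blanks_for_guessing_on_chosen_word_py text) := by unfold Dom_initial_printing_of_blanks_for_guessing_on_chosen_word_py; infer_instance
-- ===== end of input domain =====

-- B replaces A's per-character accumulation loop by a split-on-space / multiply / join pipeline (same result).

-- ===== PORT A =====
-- literal transliteration of A's loop: fold over the characters, growing blank_text by string concatenation
def initial_printing_of_blanks_for_guessing_on_chosen_word_py (text : String) : String :=
  text.toList.foldl
    (fun blank_text extracted_character =>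
      if extracted_character = ' ' then blank_text ++ " "
      else blank_text ++ "_" ++ " ")
    ""

-- ===== PORT B =====
-- " ".join("_ " * len(word) for word in text.split(" ")): split on a single space
-- (PySem.Chars.splitOn, exact for sep ≠ ""), each word rendered by string multiplication
-- (PySem.List.pyRepeat), rejoined with PySem.Str.join.
def initial_printing_of_blanks_for_guessing_on_chosen_word_py_alt (text : String) : String :=
  PySem.Str.join " "
    ((PySem.Chars.splitOn text.toList [' ']).map
      (fun word => String.ofList (PySem.List.pyRepeat ['_', ' '] (word.length : Int))))

-- ===== PRECONDITION & SPEC =====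
def Spec_initial_printing_of_blanks_for_guessing_on_chosen_word_py (text : String) (out : String) : Prop := out = initial_printing_of_blanks_for_guessing_on_chosen_word_py_alt text
instance (text : String) (out : String) : Decidable (Spec_initial_printing_of_blanks_for_guessing_on_chosen_word_py text out) := by unfold Spec_initial_printing_of_blanks_for_guessing_on_chosen_word_py; infer_instance

-- ===== CLAIM (what is proved, stated in full; the proofs are below) =====
def Claim_equal_initial_printing_of_blanks_for_guessing_on_chosen_word_py : Prop := ∀ (text : String), Dom_initial_printing_of_blanks_for_guessing_on_chosen_word_py text → Spec_initial_printing_of_blanks_for_guessing_on_chosen_word_py text (initial_printing_of_blanks_for_guessing_on_chosen_word_py text)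

-- ===== LEMMAS AND PROOFS =====

-- the per-character expansion both sides are bridged to
def pvBlank (c : Char) : List Char := if c = ' ' then [' '] else ['_', ' ']

-- A's fold is the flatMap of pvBlank
theorem pv_fold_eq_flatMap (l : List Char) (acc : String) :
    l.foldl
      (fun blank_text extracted_character =>
        if extracted_character = ' ' then blank_text ++ " "
        else blank_text ++ "_" ++ " ")
      acc
    = acc ++ String.ofList (l.flatMap pvBlank) := by
  induction l generalizing acc with
  | nil => simp
  | cons c l ih =>
    have e1 : (" " : String) = String.ofList [' '] := by decide
    have e2 : ("_" : String) = String.ofList ['_'] := by decide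
    simp only [List.foldl_cons, List.flatMap_cons, ih, pvBlank]
    by_cases h : c = ' '
    · simp only [h, ite_true, e1, e2, ← String.ofList_append, String.append_assoc]
    · simp only [if_neg h, e1, e2, ← String.ofList_append, String.append_assoc, List.append_assoc]
      rfl

-- reference split on a single space (what splitOn [' '] computes)
def pvSpl : List Char → List (List Char)
  | [] => [[]]
  | c :: rest =>
      if c = ' ' then [] :: pvSpl rest
      else
        match pvSpl rest with
        | w :: ws => (c :: w) :: ws
        | [] => [[c]]

theorem pvSpl_ne_nil (l : List Char) : pvSpl l ≠ [] := by
  cases l with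
  | nil => simp [pvSpl]
  | cons c rest =>
    simp only [pvSpl]
    split_ifs
    · simp
    · cases h : pvSpl rest <;> simp

def pvConsHead (p : List Char) : List (List Char) → List (List Char)
  | w :: ws => (p ++ w) :: ws
  | [] => []

theorem pv_go_spec (l : List Char) (fuel : Nat) (cur : List Char) (acc : List (List Char))
    (h : l.length < fuel) :
    PySem.Chars.splitOn.go [' '] fuel l cur acc
      = acc.reverse ++ pvConsHead cur.reverse (pvSpl l) := by
  induction l generalizing fuel cur acc with
  | nil =>
    cases fuel with
    | zero => omega
    | succ f => simp [PySem.Chars.splitOn.go, pvSpl, pvConsHead]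
  | cons c rest ih =>
    cases fuel with
    | zero => omega
    | succ f =>
      simp only [List.length_cons] at h
      by_cases hc : c = ' '
      · subst hc
        rw [show PySem.Chars.splitOn.go [' '] (f+1) (' ' :: rest) cur acc
              = PySem.Chars.splitOn.go [' '] f rest [] (cur.reverse :: acc) from by
            simp [PySem.Chars.splitOn.go]]
        rw [ih f [] (cur.reverse :: acc) (by omega)]
        cases hs : pvSpl rest with
        | nil => exact absurd hs (pvSpl_ne_nil rest)
        | cons w ws => simp [pvSpl, pvConsHead, hs]
      · rw [show PySem.Chars.splitOn.go [' '] (f+1) (c :: rest) cur acc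
              = PySem.Chars.splitOn.go [' '] f rest (c :: cur) acc from by
            have hb : ([' '].isPrefixOf (c :: rest)) = false := by
              simp [List.isPrefixOf]
              exact fun h => hc h.symm
            simp [PySem.Chars.splitOn.go, hb]]
        rw [ih f (c :: cur) acc (by omega)]
        cases hs : pvSpl rest with
        | nil => exact absurd hs (pvSpl_ne_nil rest)
        | cons w ws => simp [pvSpl, pvConsHead, hs, hc]

theorem pv_splitOn_eq_spl (l : List Char) :
    PySem.Chars.splitOn l [' '] = pvSpl l := by
  rw [show PySem.Chars.splitOn l [' '] = PySem.Chars.splitOn.go [' '] (l.length + 1) l [] [] from rfl,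
      pv_go_spec l (l.length + 1) [] [] (by omega)]
  cases hs : pvSpl l with
  | nil => exact absurd hs (pvSpl_ne_nil l)
  | cons w ws => simp [pvConsHead]

def pvMask (w : List Char) : List Char := PySem.List.pyRepeat ['_', ' '] (w.length : Int)

theorem pvMask_cons (c : Char) (w : List Char) : pvMask (c :: w) = '_' :: ' ' :: pvMask w := by
  simp [pvMask, PySem.List.pyRepeat, List.replicate]

theorem pv_intersperse_cons_cons (s a b : List Char) (ps : List (List Char)) :
    List.intersperse s (a :: b :: ps) = a :: s :: List.intersperse s (b :: ps) := by
  simp [List.intersperse]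

theorem pv_intersperse_head (s p q : List Char) (ps : List (List Char)) :
    (List.intersperse s ((p ++ q) :: ps)).flatten = p ++ (List.intersperse s (q :: ps)).flatten := by
  cases ps <;> simp

-- joining the masked words with " " is the flatMap of pvBlank
theorem pv_join_masked (l : List Char) :
    PySem.Chars.join [' '] ((pvSpl l).map pvMask) = l.flatMap pvBlank := by
  induction l with
  | nil => simp [pvSpl, pvMask, PySem.Chars.join, PySem.List.pyRepeat, List.intercalate]
  | cons c rest ih =>
    by_cases hc : c = ' '
    · subst hc
      cases hs : pvSpl rest with
      | nil => exact absurd hs (pvSpl_ne_nil rest)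
      | cons w ws =>
        rw [hs] at ih
        simp only [pvSpl, ite_true, hs, List.map_cons, List.flatMap_cons]
        rw [show pvMask [] = [] from rfl]
        simp only [PySem.Chars.join, List.intercalate] at ih ⊢
        simp only [List.map_cons] at ih
        simp only [List.map_cons, pv_intersperse_cons_cons, List.flatten_cons, List.nil_append]
        simp [pvBlank, ih]
    · cases hs : pvSpl rest with
      | nil => exact absurd hs (pvSpl_ne_nil rest)
      | cons w ws =>
        rw [hs] at ih
        simp only [pvSpl, if_neg hc, hs, List.map_cons, List.flatMap_cons, pvMask_cons]
        simp only [PySem.Chars.join, List.intercalate] at ih ⊢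
        rw [show ('_' :: ' ' :: pvMask w) = ['_', ' '] ++ pvMask w from rfl,
            pv_intersperse_head]
        simp only [List.map_cons] at ih
        simp [pvBlank, hc, ih]

-- ===== VERDICT (by name: the statement is the Claim_ definition above) =====
theorem initial_printing_of_blanks_for_guessing_on_chosen_word_py_spec : Claim_equal_initial_printing_of_blanks_for_guessing_on_chosen_word_py := by
  intro text _
  unfold Spec_initial_printing_of_blanks_for_guessing_on_chosen_word_py
  unfold initial_printing_of_blanks_for_guessing_on_chosen_word_py initial_printing_of_blanks_for_guessing_on_chosen_word_py_alt
  rw [pv_fold_eq_flatMap, PySem.Str.join, pv_splitOn_eq_spl]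
  have : ((pvSpl text.toList).map
      (fun word => String.ofList (PySem.List.pyRepeat ['_', ' '] (word.length : Int)))).map String.toList
      = (pvSpl text.toList).map pvMask := by
    simp [List.map_map, pvMask, Function.comp]
  rw [this, show (" " : String).toList = [' '] from rfl, pv_join_masked]
  simp
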